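-- pv_equiv track=rewrite | github.com/zstoebs/Daily-Coding-Problem | June 2020/6-11-2020.py | create_S
-- ===== SOURCE A (Python) =====
-- def create_S(segs: list):
--
--     n = len(segs)
--     if n < 2:
--         return segs
--
--     # sort based on start points
--     segs.sort(key=(lambda x: x[0]))
--     Ss = list()
--     i = 0
--     while i < n:
--
--         # if last element and didn't get popped previously then it's safe b/c it doesn't overlap with anything that's in S
--         if len(segs) == 1:
--             Ss.extend(segs)
--         # if there is no overlap b/w s1 and s2,
--         # then s1 can be added to S b/c s3's start point must be greater
--         # than s2's start point
--         elif segs[1][0] >= segs[0][1]: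
--             Ss.append(segs[0])
--             segs.pop(0)
--         # otherwise s1 and s2 overlap
--         else:
--             # if s1 encompasses s2 then s1 should be eliminated
--             # b/c s3 either starts in s1, starts in s2 which in this case
--             # starts in s1, or starts beyond s1 which starts
--             # beyond s2 in this case --> if s1 can be in the optimal solution
--             # then so can s2, but s2 may also be in an optimal solution that
--             # s1 couldn't be in b/c it overlaps some s00 later on
--             if segs[1][1] < segs[0][1]:
--                 segs.pop(0)
--             else:
--                 segs.pop(1)
--
--         i += 1
--
--     return Ss
-- ===== SOURCE B (Python) =====
-- def create_S(segs: list):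
--     # Return-value equivalent to A (A mutates segs in place; B does not).
--     if len(segs) < 2:
--         return segs
--     s = sorted(segs, key=lambda x: x[0])
--     res = []
--     cur = s[0]
--     for nxt in s[1:]:
--         if nxt[0] >= cur[1]:        # no overlap: keep cur, move on
--             res.append(cur)
--             cur = nxt
--         elif nxt[1] < cur[1]:       # cur encompasses nxt: prefer nxt
--             cur = nxt
--         # else nxt is encompassed-or-overlapping with larger end: drop nxt
--     res.append(cur)
--     return res
-- ===== Notes on version B (the rewrite author's own statement) =====
-- stated objective: alternative
-- what changed: Replaces A's n-iteration loop that repeatedly inspects and pops the front of the in-place-mutated segs list with a single index-free greedy scan over the sorted list keeping one current candidate interval; B does not mutate its argument (A sorts and empties segs in place).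
-- outside the precondition, e.g. on create_S([[0, 1], [2]]): A returns [[0, 1], [2]], B returns [[0, 1], [2]]
import Mathlib
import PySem

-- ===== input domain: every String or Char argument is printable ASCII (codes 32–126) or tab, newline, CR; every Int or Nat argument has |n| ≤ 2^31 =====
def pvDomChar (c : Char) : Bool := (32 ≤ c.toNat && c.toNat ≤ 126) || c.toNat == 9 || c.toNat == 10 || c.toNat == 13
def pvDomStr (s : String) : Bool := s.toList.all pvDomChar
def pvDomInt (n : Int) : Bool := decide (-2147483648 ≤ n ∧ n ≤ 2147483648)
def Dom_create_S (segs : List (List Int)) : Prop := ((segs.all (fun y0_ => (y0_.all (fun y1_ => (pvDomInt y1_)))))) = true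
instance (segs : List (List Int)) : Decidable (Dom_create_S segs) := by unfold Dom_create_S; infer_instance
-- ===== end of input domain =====

-- B replaces A's pop(0)-driven front-popping loop by a single greedy scan keeping a current
-- candidate; equivalence is about the RETURN value only — A sorts and empties its argument in
-- place, B does not mutate it.

-- ===== PORT A =====
-- x[i] for an index the Python code reaches only in range (Pre_ guarantees it); none would be IndexError
def pvAt (x : List Int) (i : Int) : Int := (PySem.List.pyGet? x i).getD 0

-- A's `while i < n` loop: fuel = remaining iterations, state = (segs, Ss)
def pvA_loop : Nat → List (List Int) → List (List Int) → List (List Int)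
  | 0, _, ss => ss
  | i + 1, segs, ss =>
    if segs.length = 1 then
      pvA_loop i segs (ss ++ segs)                    -- Ss.extend(segs)
    else
      match segs with
      | s0 :: s1 :: rest =>
        if pvAt s1 0 ≥ pvAt s0 1 then
          pvA_loop i (s1 :: rest) (ss ++ [s0])        -- Ss.append(segs[0]); segs.pop(0)
        else if pvAt s1 1 < pvAt s0 1 then
          pvA_loop i (s1 :: rest) ss                  -- segs.pop(0)
        else
          pvA_loop i (s0 :: rest) ss                  -- segs.pop(1)
      | _ => pvA_loop i segs ss                       -- unreachable while the loop runs (segs nonempty)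

def create_S (segs : List (List Int)) : List (List Int) :=
  if segs.length < 2 then segs
  else pvA_loop segs.length (PySem.List.sorted segs (fun x => pvAt x 0) false) []

-- ===== PORT B =====
-- B's for-loop over the sorted tail: state = (cur, res)
def pvB_scan : List Int → List (List Int) → List (List Int) → List (List Int)
  | cur, res, [] => res ++ [cur]
  | cur, res, nxt :: rest =>
    if pvAt nxt 0 ≥ pvAt cur 1 then pvB_scan nxt (res ++ [cur]) rest
    else if pvAt nxt 1 < pvAt cur 1 then pvB_scan nxt res rest
    else pvB_scan cur res rest

def create_S_alt (segs : List (List Int)) : List (List Int) :=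
  if segs.length < 2 then segs
  else
    match PySem.List.sorted segs (fun x => pvAt x 0) false with
    | [] => []                                        -- impossible: length ≥ 2
    | c :: t => pvB_scan c [] t

-- ===== PRECONDITION & SPEC =====
-- Pre_ excludes lists of ≥ 2 segments containing a segment shorter than 2: on those A almost always
-- raises IndexError on a [1] subscript; on the few such lists where the short segment is only ever
-- compared by its start A happens to return, and B returns the same value there (see cites).
def Pre_create_S (segs : List (List Int)) : Prop :=
  segs.length < 2 ∨ ∀ s ∈ segs, 2 ≤ s.length
instance (segs : List (List Int)) : Decidable (Pre_create_S segs) := by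
  unfold Pre_create_S; infer_instance

def pvWitness_create_S : List (List Int) := [[0, 2], [1, 3], [4, 5]]

def Spec_create_S (segs : List (List Int)) (out : List (List Int)) : Prop := out = create_S_alt segs
instance (segs : List (List Int)) (out : List (List Int)) : Decidable (Spec_create_S segs out) := by
  unfold Spec_create_S; infer_instance

-- ===== CLAIM (what is proved, stated in full; the proofs are below) =====
def Claim_equal_create_S : Prop :=
  ∀ (segs : List (List Int)), Dom_create_S segs → Pre_create_S segs →
    Spec_create_S segs (create_S segs)

-- ===== LEMMAS AND PROOFS =====

-- one-step unfolding of A's loop for a list of length >= 2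
theorem pvA_loop_step (i : Nat) (s0 s1 : List Int) (rest ss : List (List Int)) :
    pvA_loop (i + 1) (s0 :: s1 :: rest) ss =
      if pvAt s1 0 ≥ pvAt s0 1 then pvA_loop i (s1 :: rest) (ss ++ [s0])
      else if pvAt s1 1 < pvAt s0 1 then pvA_loop i (s1 :: rest) ss
      else pvA_loop i (s0 :: rest) ss := by
  have h : ¬ ((s0 :: s1 :: rest).length = 1) := by simp
  simp only [pvA_loop]
  rw [if_neg h]

theorem pvB_scan_acc (rest : List (List Int)) :
    ∀ (cur : List Int) (res : List (List Int)),
      pvB_scan cur res rest = res ++ pvB_scan cur [] rest := by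
  induction rest with
  | nil => intro cur res; simp [pvB_scan]
  | cons nxt r ih =>
    intro cur res
    simp only [pvB_scan]
    split_ifs
    · rw [ih, ih nxt ([] ++ [cur])]; simp
    · rw [ih, ih nxt []]
    · rw [ih, ih cur []]

theorem pvA_loop_eq_scan (rest : List (List Int)) :
    ∀ (cur : List Int) (ss : List (List Int)),
      pvA_loop (rest.length + 1) (cur :: rest) ss = ss ++ pvB_scan cur [] rest := by
  induction rest with
  | nil => intro cur ss; simp [pvA_loop, pvB_scan]
  | cons s1 r ih =>
    intro cur ss
    rw [List.length_cons, pvA_loop_step, pvB_scan]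
    split_ifs
    · rw [ih, pvB_scan_acc r s1 ([] ++ [cur])]; simp
    · rw [ih]
    · rw [ih]

-- ===== VERDICT (by name: the statement is the Claim_ definition above) =====
theorem create_S_spec : Claim_equal_create_S := by
  intro segs _ _
  unfold Spec_create_S create_S create_S_alt
  by_cases hsmall : segs.length < 2
  · simp [hsmall]
  · simp only [hsmall, if_false]
    have hlen : (PySem.List.sorted segs (fun x => pvAt x 0) false).length = segs.length :=
      PySem.List.length_sorted ..
    match hS : PySem.List.sorted segs (fun x => pvAt x 0) false with
    | [] =>
      rw [hS] at hlen
      simp at hlen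
      omega
    | c :: t =>
      rw [hS] at hlen
      have h : segs.length = t.length + 1 := by simpa using hlen.symm
      rw [h, pvA_loop_eq_scan t c []]
      simp
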